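-- pv_equiv track=rewrite | github.com/thorbert-anson-shi/Dasar-Dasar-Pemrograman-1 | TP 3/tp3_demo-ver2.py | mode_col
-- ===== SOURCE A (Python) =====
-- from collections import defaultdict, Counter
--
-- def to_list(dataframe: tuple) -> list:
--     return dataframe[0]
--
-- def get_column_names(dataframe: tuple) -> list:
--     return dataframe[1]
--
-- def get_column_types(dataframe: tuple) -> list:
--     return dataframe[2]
--
-- def mode_col(dataframe:tuple, col_name:str):
--
--     # This implementation was kind of unecessary
--     data = to_list(dataframe)
--     col_names = get_column_names(dataframe)
--     col_dtypes = get_column_types(dataframe)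
--
--     if col_name not in col_names:
--         raise Exception(f"Kolom {col_name} tidak ditemukan")
--
--     col_idx = col_names.index(col_name)
--
--     if col_dtypes[col_names.index(col_name)] != "str":
--         raise Exception(f"Kolom {col_name} harus berupa string")
--
--     if data == []:
--         raise Exception("Tabel kosong")
--
--     col_data = []
--
--     for row in data:
--         col_data.append(row[col_idx])
--
--     return Counter(col_data).most_common(1)
-- ===== SOURCE B (Python) =====
-- def mode_col(dataframe: tuple, col_name: str):
--     data = dataframe[0]
--     col_names = dataframe[1]
--     col_dtypes = dataframe[2]
--
--     if col_name not in col_names: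
--         raise Exception(f"Kolom {col_name} tidak ditemukan")
--
--     col_idx = col_names.index(col_name)
--
--     if col_dtypes[col_idx] != "str":
--         raise Exception(f"Kolom {col_name} harus berupa string")
--
--     if data == []:
--         raise Exception("Tabel kosong")
--
--     col_data = [row[col_idx] for row in data]
--
--     # table-free: at each FIRST occurrence of a value (index(v) == i),
--     # count it over the whole column and keep the running max (strict >,
--     # so the earliest value wins ties, as most_common does)
--     best = None
--     best_count = 0
--     for i, v in enumerate(col_data):
--         if col_data.index(v) == i:
--             c = col_data.count(v)
--             if c > best_count:
--                 best, best_count = v, c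
--
--     return [(best, best_count)]
-- ===== Notes on version B (the rewrite author's own statement) =====
-- stated objective: alternative
-- what changed: Replaces building a Counter and extracting most_common(1) by a table-free quadratic scan: at each position holding the first occurrence of its value (list.index(v) == i), count that value over the whole column with list.count and keep the running maximum with strict >, which preserves most_common's first-occurrence tie-breaking.
import Mathlib
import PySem

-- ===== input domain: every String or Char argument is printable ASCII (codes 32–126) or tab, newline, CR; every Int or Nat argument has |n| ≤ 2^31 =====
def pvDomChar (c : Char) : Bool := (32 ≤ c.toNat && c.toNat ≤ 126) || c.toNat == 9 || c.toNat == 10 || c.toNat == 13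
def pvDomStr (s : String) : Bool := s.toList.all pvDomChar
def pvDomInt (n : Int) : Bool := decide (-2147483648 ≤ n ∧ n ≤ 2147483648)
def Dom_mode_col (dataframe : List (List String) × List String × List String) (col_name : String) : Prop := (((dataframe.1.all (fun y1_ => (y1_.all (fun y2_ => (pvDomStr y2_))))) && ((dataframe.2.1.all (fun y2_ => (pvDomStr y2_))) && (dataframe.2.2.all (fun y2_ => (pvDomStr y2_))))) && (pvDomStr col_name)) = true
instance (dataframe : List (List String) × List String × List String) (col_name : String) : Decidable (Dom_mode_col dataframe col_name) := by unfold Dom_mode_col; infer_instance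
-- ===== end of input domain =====

-- B replaces Counter(...).most_common(1) by a table-free quadratic scan (first-occurrence test via
-- list.index, per-value list.count, running max with strict >); equal return values on Pre_ (where A
-- raises no exception).

-- ===== PORT A =====
-- The three raise-guards of A are exactly excluded by Pre_mode_col; inside Pre_ they do not fire,
-- so the port computes the fall-through path directly.
def mode_col (dataframe : List (List String) × List String × List String) (col_name : String) : List (String × Int) :=
  let data := dataframe.1
  let col_names := dataframe.2.1
  let col_idx : Nat := (PySem.List.index? col_names col_name).getD 0
  let col_data := data.foldl (fun acc row => acc ++ [PySem.List.pyGetD row (col_idx : Int) ""]) []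
  -- Counter(col_data).most_common(1) = stable descending sort of the counter's items by count, first 1
  (PySem.List.sorted (PySem.Dict.counter col_data).items (fun p => p.2) true).take 1

-- ===== PORT B =====
def mode_col_alt (dataframe : List (List String) × List String × List String) (col_name : String) : List (String × Int) :=
  let data := dataframe.1
  let col_names := dataframe.2.1
  let col_idx : Nat := (PySem.List.index? col_names col_name).getD 0
  let col_data := data.map (fun row => PySem.List.pyGetD row (col_idx : Int) "")
  let best := (PySem.List.enumerate col_data).foldl
    (fun (acc : Option String × Int) p =>
      if (((PySem.List.index? col_data p.2).getD 0 : Nat) : Int) = p.1 then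
        let c : Int := (PySem.List.count col_data p.2 : Int)
        if acc.2 < c then (some p.2, c) else acc
      else acc)
    (none, 0)
  -- best.1 = none is unreachable inside Pre_ (data nonempty); Python would return [(None, 0)] there
  match best.1 with
  | some e => [(e, best.2)]
  | none => []

-- ===== PRECONDITION & SPEC =====
-- Pre_ excludes exactly the inputs on which A raises: missing column, non-"str" dtype (or dtype list
-- too short), empty table, and rows too short for the column index (IndexError).
def Pre_mode_col (dataframe : List (List String) × List String × List String) (col_name : String) : Prop :=
  col_name ∈ dataframe.2.1 ∧
  dataframe.2.1.idxOf col_name < dataframe.2.2.length ∧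
  dataframe.2.2.getD (dataframe.2.1.idxOf col_name) "" = "str" ∧
  dataframe.1 ≠ [] ∧
  ∀ row ∈ dataframe.1, dataframe.2.1.idxOf col_name < row.length
instance (dataframe : List (List String) × List String × List String) (col_name : String) : Decidable (Pre_mode_col dataframe col_name) := by unfold Pre_mode_col; infer_instance

def pvWitness_mode_col : (List (List String) × List String × List String) × String :=
  (([["a"], ["b"], ["a"]], ["c"], ["str"]), "c")

def Spec_mode_col (dataframe : List (List String) × List String × List String) (col_name : String) (out : List (String × Int)) : Prop := out = mode_col_alt dataframe col_name
instance (dataframe : List (List String) × List String × List String) (col_name : String) (out : List (String × Int)) : Decidable (Spec_mode_col dataframe col_name out) := by unfold Spec_mode_col; infer_instance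

-- ===== CLAIM (what is proved, stated in full; the proofs are below) =====
def Claim_equal_mode_col : Prop := ∀ (dataframe : List (List String) × List String × List String) (col_name : String), Dom_mode_col dataframe col_name → Pre_mode_col dataframe col_name → Spec_mode_col dataframe col_name (mode_col dataframe col_name)

-- ===== LEMMAS AND PROOFS =====

-- the running-max step on pairs (shared characterisation of both sides)
def pvStep (m p : String × Int) : String × Int := if m.2 < p.2 then p else m

-- optional-accumulator running max (the shape max?/head-of-sorted reduce to)
def pvOptStep (acc : Option (String × Int)) (p : String × Int) : Option (String × Int) :=
  match acc with
  | none => some p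
  | some m => some (pvStep m p)

theorem pvOptFold (t : List (String × Int)) (b : String × Int) :
    t.foldl pvOptStep (some b) = some (t.foldl pvStep b) := by
  induction t generalizing b with
  | nil => rfl
  | cons p r ih => simpa [pvOptStep] using ih (pvStep b p)

theorem pvHeadInsertBy (x : String × Int) (acc : List (String × Int)) :
    (PySem.List.insertBy (fun a b => decide (b.2 < a.2)) x acc).head? =
      pvOptStep acc.head? x := by
  cases acc with
  | nil => rfl
  | cons y ys =>
    simp only [PySem.List.insertBy, pvOptStep, pvStep]
    split_ifs <;> simp_all

theorem pvHeadFold (t : List (String × Int)) (acc : List (String × Int)) :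
    (t.foldl (fun a x => PySem.List.insertBy (fun a b => decide (b.2 < a.2)) x a) acc).head? =
      t.foldl pvOptStep acc.head? := by
  induction t generalizing acc with
  | nil => rfl
  | cons p r ih => rw [List.foldl_cons, ih, pvHeadInsertBy, List.foldl_cons]

-- B's scan from (none, 0), once a first positive element is absorbed
theorem pvRunMaxB (t : List (String × Int)) (b : String × Int) :
    t.foldl (fun (acc : Option String × Int) p => if acc.2 < p.2 then (some p.1, p.2) else acc)
      (some b.1, b.2) =
    (some (t.foldl pvStep b).1, (t.foldl pvStep b).2) := by
  induction t generalizing b with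
  | nil => rfl
  | cons p r ih =>
    simp only [List.foldl_cons, pvStep]
    split_ifs with h
    · exact ih p
    · exact ih b

theorem pvCounterItemsPos (xs : List String) (p : String × Int)
    (hp : p ∈ (PySem.Dict.counter xs).items) : 0 < p.2 := by
  rw [PySem.Dict.items_counter] at hp
  obtain ⟨k, hk, rfl⟩ := List.mem_map.mp hp
  have hkxs : k ∈ xs := (PySem.Set.mem_ofList xs k).mp hk
  have := List.count_pos_iff.mpr hkxs
  simpa using this

theorem pvCounterItemsNe (xs : List String) (hxs : xs ≠ []) :
    (PySem.Dict.counter xs).items ≠ [] := by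
  rw [PySem.Dict.items_counter]
  cases xs with
  | nil => exact absurd rfl hxs
  | cons x r =>
    intro h
    have hx : x ∈ PySem.Set.ofList (x :: r) := (PySem.Set.mem_ofList (x :: r) x).mpr (by simp)
    cases hs : PySem.Set.ofList (x :: r) with
    | nil => rw [hs] at hx; simp at hx
    | cons a t => rw [hs] at h; simp at h

-- head of the reverse-stable sort by count = running max (first maximal element)
theorem pvHeadSortedRev (l : List (String × Int)) :
    (PySem.List.sorted l (fun p => p.2) true).head? = l.foldl pvOptStep none := by
  rw [PySem.List.sorted_rev_eq_foldl_insertBy]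
  simpa using pvHeadFold l []

-- fold with a guard = fold of the guarded step over the filtered values
theorem pvFoldFirst (l : List (Int × String)) (P : Int × String → Prop) [DecidablePred P]
    (g : (Option String × Int) → String → (Option String × Int)) (init : Option String × Int) :
    l.foldl (fun acc p => if P p then g acc p.2 else acc) init
      = ((l.filter (fun p => decide (P p))).map (·.2)).foldl g init := by
  induction l generalizing init with
  | nil => rfl
  | cons a t ih => by_cases h : P a <;> simp [h, ih]

-- B's first-occurrence filter over enumerate picks exactly set(xs): the distinct values in
-- first-occurrence order
theorem pvFirstOccFilter (xs : List String) :
    ((PySem.List.enumerate xs).filter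
        (fun p => decide ((((PySem.List.index? xs p.2).getD 0 : Nat) : Int) = p.1))).map (·.2)
      = PySem.Set.ofList xs := by
  induction xs using List.reverseRecOn with
  | nil => rfl
  | append_singleton xs x ih =>
    rw [PySem.List.enumerate_append, List.filter_append, List.map_append]
    have h1 : (PySem.List.enumerate xs).filter
        (fun p => decide ((((PySem.List.index? (xs ++ [x]) p.2).getD 0 : Nat) : Int) = p.1))
        = (PySem.List.enumerate xs).filter
        (fun p => decide ((((PySem.List.index? xs p.2).getD 0 : Nat) : Int) = p.1)) := by
      apply List.filter_congr
      intro p hp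
      obtain ⟨k, hk, rfl⟩ := (PySem.List.mem_enumerate_iff xs 0 p).mp hp
      rw [PySem.List.index?_append_of_mem [x] (List.getElem_mem hk)]
    rw [h1, ih]
    have hofl : PySem.Set.ofList (xs ++ [x]) = PySem.Set.add (PySem.Set.ofList xs) x := by
      rw [PySem.Set.ofList_eq_foldl, List.foldl_append]
      rfl
    rw [hofl]
    by_cases hx : x ∈ xs
    · -- x already occurred: the appended pair fails the first-occurrence test and add is a no-op
      obtain ⟨k, hk⟩ := Option.isSome_iff_exists.mp ((PySem.List.index?_isSome_iff xs x).mpr hx)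
      obtain ⟨hklt, -, -⟩ := PySem.List.getElem_of_index?_eq_some hk
      have hidx : PySem.List.index? (xs ++ [x]) x = some k := by
        rw [PySem.List.index?_append_of_mem [x] hx, hk]
      have hadd : PySem.Set.add (PySem.Set.ofList xs) x = PySem.Set.ofList xs := by
        simp [PySem.Set.add, PySem.Set.contains, (PySem.Set.mem_ofList xs x).mpr hx]
      have hne : ¬ (((k : Nat) : Int) = 0 + (xs.length : Int)) := by omega
      have hsingle : (PySem.List.enumerate [x] (0 + (xs.length : Int))).filter
          (fun p => decide ((((PySem.List.index? (xs ++ [x]) p.2).getD 0 : Nat) : Int) = p.1)) = [] := by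
        rw [PySem.List.enumerate_cons, PySem.List.enumerate_nil, List.filter_cons]
        rw [show PySem.List.index? (xs ++ [x]) x = some k from hidx]
        simp only [Option.getD_some, List.filter_nil]
        rw [if_neg (by simpa using hne)]
      rw [hsingle, hadd]
      simp
    · -- genuinely new value: the appended pair passes and add appends
      have hidx : PySem.List.index? (xs ++ [x]) x = some xs.length :=
        PySem.List.index?_append_singleton_self xs x hx
      have hadd : PySem.Set.add (PySem.Set.ofList xs) x = PySem.Set.ofList xs ++ [x] := by
        simp [PySem.Set.add, PySem.Set.contains, (PySem.Set.mem_ofList xs x), hx]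
      have hsingle : (PySem.List.enumerate [x] (0 + (xs.length : Int))).filter
          (fun p => decide ((((PySem.List.index? (xs ++ [x]) p.2).getD 0 : Nat) : Int) = p.1))
          = [(0 + (xs.length : Int), x)] := by
        rw [PySem.List.enumerate_cons, PySem.List.enumerate_nil, List.filter_cons]
        rw [show PySem.List.index? (xs ++ [x]) x = some xs.length from hidx]
        simp only [Option.getD_some, List.filter_nil]
        rw [if_pos (by simp)]
      rw [hsingle, hadd]
      simp

theorem mode_col_eq_alt (dataframe : List (List String) × List String × List String)
    (col_name : String) (hpre : Pre_mode_col dataframe col_name) :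
    mode_col dataframe col_name = mode_col_alt dataframe col_name := by
  obtain ⟨_, _, _, hdata, _⟩ := hpre
  unfold mode_col mode_col_alt
  simp only []
  set i : Nat := (PySem.List.index? dataframe.2.1 col_name).getD 0 with hi
  set f : List String → String := fun row => PySem.List.pyGetD row (i : Int) "" with hf
  have hcol : dataframe.1.foldl (fun acc row => acc ++ [f row]) [] = dataframe.1.map f := by
    simpa using PySem.List.foldl_append_singleton_eq_map (l := dataframe.1) (f := f) (acc := [])
  rw [hcol]
  set xs := dataframe.1.map f with hxs
  have hxsne : xs ≠ [] := by simpa [hxs] using hdata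
  -- B's scan over enumerate = the same running max over the counter's items
  have hBfold : (PySem.List.enumerate xs).foldl
      (fun (acc : Option String × Int) p =>
        if (((PySem.List.index? xs p.2).getD 0 : Nat) : Int) = p.1 then
          let c : Int := (PySem.List.count xs p.2 : Int)
          if acc.2 < c then (some p.2, c) else acc
        else acc)
      (none, 0) =
      (PySem.Dict.counter xs).items.foldl
        (fun (acc : Option String × Int) q => if acc.2 < q.2 then (some q.1, q.2) else acc)
        (none, 0) := by
    rw [pvFoldFirst (PySem.List.enumerate xs)
          (fun p => (((PySem.List.index? xs p.2).getD 0 : Nat) : Int) = p.1)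
          (fun acc v =>
            let c : Int := (PySem.List.count xs v : Int)
            if acc.2 < c then (some v, c) else acc)]
    rw [pvFirstOccFilter, PySem.Dict.items_counter]
    rw [List.foldl_map]
    rfl
  rw [hBfold]
  set l := (PySem.Dict.counter xs).items with hl
  have hlne : l ≠ [] := pvCounterItemsNe xs hxsne
  cases hlc : l with
  | nil => exact absurd hlc hlne
  | cons p rest =>
    have hppos : 0 < p.2 := pvCounterItemsPos xs p (by rw [← hl, hlc]; simp)
    have hhead : (PySem.List.sorted l (fun p => p.2) true).head? = some (rest.foldl pvStep p) := by
      rw [pvHeadSortedRev, hlc, List.foldl_cons]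
      exact pvOptFold rest p
    have hsne : PySem.List.sorted l (fun p => p.2) true ≠ [] := by
      intro h
      exact hlne ((PySem.List.sorted_eq_nil_iff l (fun p => p.2) true).mp h)
    obtain ⟨m, t, hmt⟩ := List.exists_cons_of_ne_nil hsne
    rw [hmt] at hhead
    have hm : m = rest.foldl pvStep p := by simpa using hhead
    have hB : (p :: rest).foldl
        (fun (acc : Option String × Int) q => if acc.2 < q.2 then (some q.1, q.2) else acc)
        (none, 0) =
        (some (rest.foldl pvStep p).1, (rest.foldl pvStep p).2) := by
      rw [List.foldl_cons, if_pos hppos]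
      exact pvRunMaxB rest p
    rw [hlc] at hmt
    rw [hmt, hB, hm]
    simp

-- ===== VERDICT (by name: the statement is the Claim_ definition above) =====
theorem mode_col_spec : Claim_equal_mode_col := by
  intro dataframe col_name _ hpre
  exact mode_col_eq_alt dataframe col_name hpre
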